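-- pv_equiv track=rewrite | github.com/eupraylius/Smart-Traffic-Signal-Automation | fsmplaceholder.py | simple_fsm
-- ===== SOURCE A (Python) =====
-- def simple_fsm(input_sequence):
--     state = "START"  # Initial state
--     output = []
--
--     for char in input_sequence:
--         if state == "START":
--             if char == 'a':
--                 state = "STATE_A"
--             else:
--                 state = "ERROR"
--         elif state == "STATE_A":
--             if char == 'b':
--                 state = "STATE_B"
--             else:
--                 state = "ERROR"
--         elif state == "STATE_B":
--             if char == 'c':
--                 state = "END"
--             else:
--                 state = "ERROR"
--         elif state == "END":
--             # No further transitions from END state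
--             pass
--         elif state == "ERROR":
--             # Stay in error state
--             pass
--         output.append(state)
--     return state, output
-- ===== SOURCE B (Python) =====
-- def simple_fsm(input_sequence):
--     # The machine only ever follows the fixed chain START-a->STATE_A-b->STATE_B-c->END,
--     # falling permanently into ERROR on the first mismatch. So the whole run is a
--     # closed form of k = length of the longest prefix of the input matching "abc":
--     # the trace is the first k chain states followed by a constant-filled tail.
--     n = len(input_sequence)
--     k = 0
--     while k < 3 and k < n and input_sequence[k] == "abc"[k]:
--         k += 1
--     tail = "END" if k == 3 else "ERROR"
--     output = ["STATE_A", "STATE_B", "END"][:k] + [tail] * (n - k)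
--     return (output[-1] if output else "START"), output
-- ===== Notes on version B (the rewrite author's own statement) =====
-- stated objective: faster
-- what changed: Replaces the per-character state-machine simulation with a closed form: compute k, the length of the longest prefix of the input matching 'abc', and build the trace as the first k chain states followed by a constant-filled tail (END if k=3 else ERROR).
import Mathlib
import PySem

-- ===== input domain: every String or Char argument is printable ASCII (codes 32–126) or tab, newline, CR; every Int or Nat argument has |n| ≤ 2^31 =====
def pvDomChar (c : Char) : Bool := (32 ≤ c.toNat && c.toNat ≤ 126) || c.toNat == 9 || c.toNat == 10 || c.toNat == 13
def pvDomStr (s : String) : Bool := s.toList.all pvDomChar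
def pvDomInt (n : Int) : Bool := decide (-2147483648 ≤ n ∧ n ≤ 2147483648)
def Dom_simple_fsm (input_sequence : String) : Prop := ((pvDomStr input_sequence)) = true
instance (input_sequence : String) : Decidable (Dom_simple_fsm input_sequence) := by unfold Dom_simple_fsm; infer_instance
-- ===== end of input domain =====

-- B replaces the per-character FSM simulation with a closed form over the longest
-- prefix of the input matching "abc" (measurably faster by a constant factor).

-- ===== PORT A =====
-- the for-loop of A, carrying (state, output)
def fsmLoopA : String → List String → List Char → String × List String
  | state, output, [] => (state, output)
  | state, output, c :: rest =>
    let state' :=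
      if state = "START" then (if c = 'a' then "STATE_A" else "ERROR")
      else if state = "STATE_A" then (if c = 'b' then "STATE_B" else "ERROR")
      else if state = "STATE_B" then (if c = 'c' then "END" else "ERROR")
      else if state = "END" then state
      else if state = "ERROR" then state
      else state
    fsmLoopA state' (output ++ [state']) rest

def simple_fsm (input_sequence : String) : String × List String :=
  fsmLoopA "START" [] input_sequence.toList

-- ===== PORT B =====
-- Source B's while loop computing k: the length of the longest prefix of the input
-- matching the pattern "abc" (structural recursion over pattern and input)
def fsmK : List Char → List Char → Nat
  | p :: ps, c :: cs => if c = p then 1 + fsmK ps cs else 0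
  | _, _ => 0

-- Source B's body on the character list
def fsmAltCore (cs : List Char) : String × List String :=
  let k := fsmK ['a', 'b', 'c'] cs
  let tail := if k = 3 then "END" else "ERROR"
  let output := ["STATE_A", "STATE_B", "END"].take k ++ List.replicate (cs.length - k) tail
  ((output.getLast?).getD "START", output)

def simple_fsm_alt (input_sequence : String) : String × List String :=
  fsmAltCore input_sequence.toList

-- ===== PRECONDITION & SPEC =====
def Spec_simple_fsm (input_sequence : String) (out : String × List String) : Prop := out = simple_fsm_alt input_sequence
instance (input_sequence : String) (out : String × List String) : Decidable (Spec_simple_fsm input_sequence out) := by unfold Spec_simple_fsm; infer_instance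

-- ===== CLAIM (what is proved, stated in full; the proofs are below) =====
def Claim_equal_simple_fsm : Prop := ∀ (input_sequence : String), Dom_simple_fsm input_sequence → Spec_simple_fsm input_sequence (simple_fsm input_sequence)

-- ===== LEMMAS AND PROOFS =====

-- once in a terminal state, A's loop just appends that state for each remaining char
lemma fsmLoopA_terminal (t : String) (ht : t = "END" ∨ t = "ERROR") :
    ∀ (l : List Char) (out : List String),
    fsmLoopA t out l = (t, out ++ List.replicate l.length t) := by
  intro l
  induction l with
  | nil => intro out; simp [fsmLoopA]
  | cons c rest ih =>
    intro out
    rcases ht with rfl | rfl <;>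
      simp [fsmLoopA, ih, List.replicate_succ]

lemma getLastD_cons_replicate (x d : String) (n : Nat) :
    ((x :: List.replicate n x).getLast?).getD d = x := by
  rw [← List.replicate_succ]
  simp [List.getLast?_replicate]

lemma fsm_core_eq (l : List Char) : fsmLoopA "START" [] l = fsmAltCore l := by
  match l with
  | [] => rfl
  | c :: l1 =>
    by_cases hc : c = 'a'
    · subst hc
      match l1 with
      | [] => rfl
      | c2 :: l2 =>
        by_cases hc2 : c2 = 'b'
        · subst hc2
          match l2 with
          | [] => rfl
          | c3 :: l3 =>
            by_cases hc3 : c3 = 'c'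
            · subst hc3
              simp only [fsmLoopA]
              simp
              rw [fsmLoopA_terminal "END" (Or.inl rfl)]
              simp [fsmAltCore, fsmK, getLastD_cons_replicate]
            · simp only [fsmLoopA]
              simp [hc3]
              rw [fsmLoopA_terminal "ERROR" (Or.inr rfl)]
              simp [fsmAltCore, fsmK, hc3, List.replicate_succ, getLastD_cons_replicate]
        · simp only [fsmLoopA]
          simp [hc2]
          rw [fsmLoopA_terminal "ERROR" (Or.inr rfl)]
          simp [fsmAltCore, fsmK, hc2, List.replicate_succ, getLastD_cons_replicate]
    · simp only [fsmLoopA]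
      simp [hc]
      rw [fsmLoopA_terminal "ERROR" (Or.inr rfl)]
      simp [fsmAltCore, fsmK, hc, List.replicate_succ, getLastD_cons_replicate]

-- ===== VERDICT (by name: the statement is the Claim_ definition above) =====
theorem simple_fsm_spec : Claim_equal_simple_fsm := by
  intro s _
  unfold Spec_simple_fsm simple_fsm simple_fsm_alt
  exact fsm_core_eq s.toList
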